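-- pv_equiv track=rewrite | github.com/mumuvrf/Academia-Python | Aula 6/kits_para_corredores.py | organiza_filas
-- ===== SOURCE A (Python) =====
-- def organiza_filas(pessoas):
--     filas = [
--         [],
--         [],
--         [],
--         []
--     ]
--     for pessoa in pessoas:
--         if(pessoa[1] <= 20):
--             filas[0].append(pessoa[0])
--         elif(pessoa[1] <= 40):
--             filas[1].append(pessoa[0])
--         elif(pessoa[1] <= 60):
--             filas[2].append(pessoa[0])
--         else:
--             filas[3].append(pessoa[0])
--     return filas
-- ===== SOURCE B (Python) =====
-- def organiza_filas(pessoas):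
--     return [
--         [nome for nome, idade in pessoas if idade <= 20],
--         [nome for nome, idade in pessoas if 20 < idade <= 40],
--         [nome for nome, idade in pessoas if 40 < idade <= 60],
--         [nome for nome, idade in pessoas if 60 < idade],
--     ]
-- ===== Notes on version B (the rewrite author's own statement) =====
-- stated objective: simpler
-- what changed: Replaces the single pass that mutates four accumulator lists through an if/elif chain with four independent list comprehensions, one filter per age range, built directly into the returned list.
import Mathlib
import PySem

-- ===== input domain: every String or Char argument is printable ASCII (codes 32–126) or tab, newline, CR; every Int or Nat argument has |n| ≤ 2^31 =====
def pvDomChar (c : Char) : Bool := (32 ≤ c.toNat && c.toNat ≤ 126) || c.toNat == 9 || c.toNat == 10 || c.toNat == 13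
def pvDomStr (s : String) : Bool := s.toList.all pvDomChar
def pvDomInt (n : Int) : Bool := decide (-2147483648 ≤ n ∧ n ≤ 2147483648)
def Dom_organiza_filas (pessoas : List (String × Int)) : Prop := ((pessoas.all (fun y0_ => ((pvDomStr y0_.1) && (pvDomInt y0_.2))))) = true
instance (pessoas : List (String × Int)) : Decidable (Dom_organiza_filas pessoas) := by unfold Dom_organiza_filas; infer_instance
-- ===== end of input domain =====

-- B replaces A's single pass mutating four accumulators with four independent
-- filters (list comprehensions), one per age range; objective: simpler.

-- ===== PORT A =====
-- A keeps four lists and appends each person's name to one of them via the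
-- if/elif chain; ported as a fold over the same four-list state.
def organiza_filas (pessoas : List (String × Int)) : List (List String) :=
  let filas : List String × List String × List String × List String := ([], [], [], [])
  let r := pessoas.foldl (fun f p =>
    if p.2 ≤ 20 then (f.1 ++ [p.1], f.2.1, f.2.2.1, f.2.2.2)
    else if p.2 ≤ 40 then (f.1, f.2.1 ++ [p.1], f.2.2.1, f.2.2.2)
    else if p.2 ≤ 60 then (f.1, f.2.1, f.2.2.1 ++ [p.1], f.2.2.2)
    else (f.1, f.2.1, f.2.2.1, f.2.2.2 ++ [p.1])) filas
  [r.1, r.2.1, r.2.2.1, r.2.2.2]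

-- ===== PORT B =====
def organiza_filas_alt (pessoas : List (String × Int)) : List (List String) :=
  [ (pessoas.filter (fun p => p.2 ≤ 20)).map (fun p => p.1),
    (pessoas.filter (fun p => 20 < p.2 ∧ p.2 ≤ 40)).map (fun p => p.1),
    (pessoas.filter (fun p => 40 < p.2 ∧ p.2 ≤ 60)).map (fun p => p.1),
    (pessoas.filter (fun p => 60 < p.2)).map (fun p => p.1) ]

-- ===== PRECONDITION & SPEC =====
def Spec_organiza_filas (pessoas : List (String × Int)) (out : List (List String)) : Prop := out = organiza_filas_alt pessoas
instance (pessoas : List (String × Int)) (out : List (List String)) : Decidable (Spec_organiza_filas pessoas out) := by unfold Spec_organiza_filas; infer_instance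

-- ===== CLAIM (what is proved, stated in full; the proofs are below) =====
def Claim_equal_organiza_filas : Prop := ∀ (pessoas : List (String × Int)), Dom_organiza_filas pessoas → Spec_organiza_filas pessoas (organiza_filas pessoas)

-- ===== LEMMAS AND PROOFS =====
theorem organiza_filas_fold (pessoas : List (String × Int))
    (a b c d : List String) :
    pessoas.foldl (fun f p =>
      if p.2 ≤ 20 then (f.1 ++ [p.1], f.2.1, f.2.2.1, f.2.2.2)
      else if p.2 ≤ 40 then (f.1, f.2.1 ++ [p.1], f.2.2.1, f.2.2.2)
      else if p.2 ≤ 60 then (f.1, f.2.1, f.2.2.1 ++ [p.1], f.2.2.2)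
      else (f.1, f.2.1, f.2.2.1, f.2.2.2 ++ [p.1])) (a, b, c, d)
    = (a ++ (pessoas.filter (fun p => p.2 ≤ 20)).map (fun p => p.1),
       b ++ (pessoas.filter (fun p => 20 < p.2 ∧ p.2 ≤ 40)).map (fun p => p.1),
       c ++ (pessoas.filter (fun p => 40 < p.2 ∧ p.2 ≤ 60)).map (fun p => p.1),
       d ++ (pessoas.filter (fun p => 60 < p.2)).map (fun p => p.1)) := by
  induction pessoas generalizing a b c d with
  | nil => simp
  | cons hd tl ih =>
    by_cases h1 : hd.2 ≤ 20
    · simp [List.foldl_cons, h1, ih,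
        show ¬(20 < hd.2) by omega, show ¬(40 < hd.2) by omega, show ¬(60 < hd.2) by omega]
    · by_cases h2 : hd.2 ≤ 40
      · simp [List.foldl_cons, h1, h2, ih,
          show 20 < hd.2 by omega, show ¬(40 < hd.2) by omega, show ¬(60 < hd.2) by omega]
      · by_cases h3 : hd.2 ≤ 60
        · simp [List.foldl_cons, h1, h2, h3, ih,
            show 40 < hd.2 by omega, show ¬(60 < hd.2) by omega]
        · simp [List.foldl_cons, h1, h2, h3, ih,
            show 60 < hd.2 by omega]

-- ===== VERDICT (by name: the statement is the Claim_ definition above) =====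
theorem organiza_filas_spec : Claim_equal_organiza_filas := by
  intro pessoas _
  unfold Spec_organiza_filas organiza_filas organiza_filas_alt
  simp [organiza_filas_fold]
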